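-- pv_equiv track=rewrite | github.com/msellamiTN/fedfca-framework | participant/almactor.py | construct_formal_context
-- ===== SOURCE A (Python) =====
-- def construct_formal_context(transactions):
--     # Get all unique items (attributes) across all transactions
--     items = set(item for transaction in transactions for item in transaction)
--     attribute_list = sorted(items)  # List of attributes (sorted for consistency)
--
--     # Initialize the binary matrix
--     matrix = []
--
--     # For each transaction, create a binary row (True if item is present, False if not)
--     for transaction in transactions:
--         row = [item in transaction for item in attribute_list]
--         matrix.append(row)
--
--     # Define objects as indices of the transactions
--     objects = list(range(len(transactions)))
--
--     return objects, attribute_list, matrix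
-- ===== SOURCE B (Python) =====
-- def construct_formal_context(transactions):
--     # Scatter approach: index each sorted attribute to a column, then for each
--     # transaction fill a row of False by setting the columns of its items.
--     items = set()
--     for transaction in transactions:
--         items.update(transaction)
--     attribute_list = sorted(items)
--     index = {}
--     for i, item in enumerate(attribute_list):
--         index[item] = i
--     n = len(attribute_list)
--     matrix = []
--     for transaction in transactions:
--         row = [False] * n
--         for item in transaction:
--             row[index[item]] = True
--         matrix.append(row)
--     objects = list(range(len(transactions)))
--     return objects, attribute_list, matrix
-- ===== Notes on version B (the rewrite author's own statement) =====
-- stated objective: faster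
-- what changed: B maps each sorted attribute to its column via an index dict and, per transaction, scatters the transaction's items into a preallocated False row, instead of A's per-cell 'item in transaction' membership scan over the whole attribute list.
import Mathlib
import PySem

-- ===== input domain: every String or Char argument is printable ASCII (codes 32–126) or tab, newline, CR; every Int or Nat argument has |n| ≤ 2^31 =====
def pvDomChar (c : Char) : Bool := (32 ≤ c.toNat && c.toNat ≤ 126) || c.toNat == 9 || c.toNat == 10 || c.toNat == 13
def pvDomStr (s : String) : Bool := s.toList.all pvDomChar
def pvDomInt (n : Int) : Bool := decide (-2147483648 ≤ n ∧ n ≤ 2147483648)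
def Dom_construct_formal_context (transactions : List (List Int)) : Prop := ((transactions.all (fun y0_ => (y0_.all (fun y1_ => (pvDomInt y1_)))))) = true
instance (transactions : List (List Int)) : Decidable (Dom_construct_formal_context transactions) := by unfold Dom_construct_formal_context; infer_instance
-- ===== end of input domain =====

-- B replaces A's per-cell membership scan by an attribute→column index and a scatter
-- of each transaction's items into a row initialised to False (objective: faster).

-- ===== PORT A =====
def construct_formal_context (transactions : List (List Int)) : List Int × List Int × List (List Bool) :=
  -- items = set(item for transaction in transactions for item in transaction)
  let items : PySem.Set Int := PySem.Set.ofList (transactions.flatMap (fun t => t))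
  -- attribute_list = sorted(items)
  let attribute_list : List Int := PySem.List.sorted items (fun x => x) false
  -- for each transaction, row = [item in transaction for item in attribute_list]
  let matrix : List (List Bool) :=
    transactions.foldl (fun m t => m ++ [attribute_list.map (fun item => t.contains item)]) []
  -- objects = list(range(len(transactions)))
  let objects : List Int := PySem.List.pyRange 0 transactions.length 1
  (objects, attribute_list, matrix)

-- ===== PORT B =====
-- index = {}; for i, item in enumerate(attribute_list): index[item] = i
def cfcIndex (attrs : List Int) : PySem.Dict Int Int :=
  (PySem.List.enumerate attrs 0).foldl (fun d p => d.insert p.2 p.1) PySem.Dict.empty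

-- row = [False]*n; for item in transaction: row[index[item]] = True
-- (index[item] always exists and is in [0, n): every item occurs in attribute_list,
--  so the KeyError branch is unreachable and pySetD is exact here)
def cfcRow (index : PySem.Dict Int Int) (n : Nat) (t : List Int) : List Bool :=
  t.foldl (fun row item =>
      match index.get? item with
      | some i => PySem.List.pySetD row i true
      | none => row)
    (List.replicate n false)

def construct_formal_context_alt (transactions : List (List Int)) : List Int × List Int × List (List Bool) :=
  let items : PySem.Set Int :=
    transactions.foldl (fun s t => PySem.Set.update s t) PySem.Set.empty
  let attribute_list : List Int := PySem.List.sorted items (fun x => x) false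
  let index := cfcIndex attribute_list
  let n := attribute_list.length
  let matrix : List (List Bool) :=
    transactions.foldl (fun m t => m ++ [cfcRow index n t]) []
  let objects : List Int := PySem.List.pyRange 0 transactions.length 1
  (objects, attribute_list, matrix)

-- ===== PRECONDITION & SPEC =====
def Spec_construct_formal_context (transactions : List (List Int)) (out : List Int × List Int × List (List Bool)) : Prop := out = construct_formal_context_alt transactions
instance (transactions : List (List Int)) (out : List Int × List Int × List (List Bool)) : Decidable (Spec_construct_formal_context transactions out) := by unfold Spec_construct_formal_context; infer_instance

-- ===== CLAIM (what is proved, stated in full; the proofs are below) =====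
def Claim_equal_construct_formal_context : Prop := ∀ (transactions : List (List Int)), Dom_construct_formal_context transactions → Spec_construct_formal_context transactions (construct_formal_context transactions)

-- ===== LEMMAS AND PROOFS =====

-- both item accumulations build the same set
lemma cfc_foldl_update (transactions : List (List Int)) (s : PySem.Set Int) :
    transactions.foldl (fun s t => PySem.Set.update s t) s
      = PySem.Set.update s (transactions.flatMap (fun t => t)) := by
  induction transactions generalizing s with
  | nil => simp [PySem.Set.update_nil]
  | cons t ts ih => simp [List.foldl_cons, ih, PySem.Set.update_append]

lemma cfc_items_eq (transactions : List (List Int)) :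
    transactions.foldl (fun s t => PySem.Set.update s t) PySem.Set.empty
      = PySem.Set.ofList (transactions.flatMap (fun t => t)) := by
  rw [cfc_foldl_update]
  exact PySem.Set.update_nil_left _

-- the index dict is positional lookup into a duplicate-free attribute list
lemma cfcIndex_get?_aux (xs : List Int) (h : xs.Nodup) (a : Int) :
    ∀ (s : Int) (d : PySem.Dict Int Int),
      ((PySem.List.enumerate xs s).foldl (fun d p => d.insert p.2 p.1) d).get? a
        = if a ∈ xs then some (s + (xs.idxOf a : Int)) else d.get? a := by
  induction xs with
  | nil => intro s d; simp [PySem.List.enumerate_nil]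
  | cons x xs ih =>
    intro s d
    rcases List.nodup_cons.mp h with ⟨hx, hnd⟩
    rw [PySem.List.enumerate_cons]
    simp only [List.foldl_cons]
    rw [ih hnd (s+1) (d.insert x s)]
    by_cases hmem : a ∈ xs
    · have hax : a ≠ x := fun hh => hx (hh ▸ hmem)
      simp only [hmem, if_true, List.mem_cons, hax, false_or, if_true]
      rw [List.idxOf_cons_ne _ (fun hh => hax hh.symm)]
      push_cast
      ring_nf
    · simp only [hmem, if_false]
      rw [PySem.Dict.get?_insert]
      by_cases hax : a = x
      · subst hax
        simp [List.idxOf_cons_self]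
      · simp [hax, hmem]

lemma cfcIndex_get? (attrs : List Int) (h : attrs.Nodup) (a : Int) :
    (cfcIndex attrs).get? a = if a ∈ attrs then some (attrs.idxOf a : Int) else none := by
  unfold cfcIndex
  rw [cfcIndex_get?_aux attrs h a 0 PySem.Dict.empty]
  simp [PySem.Dict.get?_empty]

-- the scatter loop: each step sets column idxOf item
lemma cfcRow_step (attrs : List Int) (h : attrs.Nodup) (row : List Bool)
    (hlen : row.length = attrs.length) (item : Int) (hitem : item ∈ attrs) :
    (match (cfcIndex attrs).get? item with
      | some i => PySem.List.pySetD row i true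
      | none => row) = row.set (attrs.idxOf item) true := by
  rw [cfcIndex_get? attrs h item]
  simp only [hitem, if_true]
  have hlt : attrs.idxOf item < row.length := by
    rw [hlen]; exact List.idxOf_lt_length_of_mem hitem
  rw [PySem.List.pySetD, PySem.List.pySet?_natCast row (List.idxOf item attrs) true hlt]
  rfl

lemma cfcRow_inv (attrs : List Int) (h : attrs.Nodup) (t : List Int)
    (ht : ∀ x ∈ t, x ∈ attrs) :
    ∀ (row : List Bool) (hlen : row.length = attrs.length),
      t.foldl (fun row item =>
        match (cfcIndex attrs).get? item with
        | some i => PySem.List.pySetD row i true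
        | none => row) row
      = List.ofFn (fun k : Fin attrs.length =>
          row.getD k false || t.contains attrs[k]) := by
  induction t with
  | nil =>
    intro row hlen
    simp only [List.foldl_nil]
    apply List.ext_getElem
    · simp [hlen]
    · intro k h1 h2
      simp only [List.getElem_ofFn]
      have hk : k < row.length := h1
      simp [List.getD_eq_getElem?_getD, List.getElem?_eq_getElem hk]
  | cons x t ih =>
    intro row hlen
    have hx : x ∈ attrs := ht x (List.mem_cons_self)
    have ht' : ∀ y ∈ t, y ∈ attrs := fun y hy => ht y (List.mem_cons_of_mem _ hy)
    simp only [List.foldl_cons]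
    rw [cfcRow_step attrs h row hlen x hx,
        ih ht' (row.set (attrs.idxOf x) true) (by simp [hlen])]
    apply List.ext_getElem
    · simp
    · intro k h1 h2
      simp only [List.getElem_ofFn]
      have hk : k < row.length := by simp at h1; omega
      have hk' : k < attrs.length := hlen ▸ hk
      rw [List.getD_eq_getElem _ _ (by simp [hk] : k < (row.set (attrs.idxOf x) true).length),
          List.getD_eq_getElem _ _ hk]
      rw [List.getElem_set]
      by_cases heq : attrs.idxOf x = k
      · subst heq
        have : attrs[List.idxOf x attrs]'(List.idxOf_lt_length_of_mem hx) = x :=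
          List.getElem_idxOf (List.idxOf_lt_length_of_mem hx)
        simp [this]
      · have hne : attrs[k] ≠ x := by
          intro hh
          apply heq
          have hx' : attrs[attrs.idxOf x]'(List.idxOf_lt_length_of_mem hx) = x :=
            List.getElem_idxOf (List.idxOf_lt_length_of_mem hx)
          exact (List.Nodup.getElem_inj_iff h).mp (hx'.trans hh.symm)
        simp [heq, hne]

-- the scatter row equals A's gather row
lemma cfcRow_eq (attrs : List Int) (h : attrs.Nodup) (t : List Int) (ht : ∀ x ∈ t, x ∈ attrs) :
    cfcRow (cfcIndex attrs) attrs.length t = attrs.map (fun item => t.contains item) := by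
  unfold cfcRow
  rw [cfcRow_inv attrs h t ht (List.replicate attrs.length false) (by simp)]
  apply List.ext_getElem
  · simp
  · intro k h1 h2
    simp

lemma foldl_append_map {α β : Type} (f : α → β) (l : List α) (acc : List β) :
    l.foldl (fun m t => m ++ [f t]) acc = acc ++ l.map f := by
  induction l generalizing acc with
  | nil => simp
  | cons x xs ih => simp [List.foldl_cons, ih]

-- ===== VERDICT (by name: the statement is the Claim_ definition above) =====
theorem construct_formal_context_spec : Claim_equal_construct_formal_context := by
  intro transactions _
  unfold Spec_construct_formal_context construct_formal_context construct_formal_context_alt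
  rw [cfc_items_eq]
  set attrs := PySem.List.sorted (PySem.Set.ofList (transactions.flatMap (fun t => t))) (fun x => x) false with hattrs
  have hnd : attrs.Nodup := (PySem.List.sorted_perm _ _ _).nodup_iff.mpr (PySem.Set.nodup_ofList _)
  have hmem : ∀ t ∈ transactions, ∀ x ∈ t, x ∈ attrs := by
    intro t ht x hx
    rw [hattrs, PySem.List.mem_sorted, PySem.Set.mem_ofList, List.mem_flatMap]
    exact ⟨t, ht, hx⟩
  simp only [foldl_append_map, List.nil_append]
  refine Prod.ext rfl (Prod.ext rfl ?_)
  simp only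
  apply List.map_congr_left
  intro t ht
  exact (cfcRow_eq attrs hnd t (hmem t ht)).symm
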